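-- pv_equiv track=rewrite | github.com/leandrocalesso/projeto_megasena_python | PythonApplication1/PythonApplication1.py | func_filtro_quadrantes
-- ===== SOURCE A (Python) =====
-- def func_filtro_quadrantes ( lista_sequencia ) :
--
--     identifica_quadrantes    = { 1 : [ 1, 2, 3, 4, 5, 11, 12, 13, 14, 15, 21, 22, 23, 24, 25      ],
--                                  2 : [ 6, 7, 8, 9, 10, 16, 17, 18, 19, 20, 26, 27, 28, 29, 30     ],
--                                  3 : [ 31, 32, 33, 34, 35, 41, 42, 43, 44, 45, 51, 52, 53, 54, 55 ],
--                                  4 : [ 36, 37, 38, 39, 40, 46, 47, 48, 49, 50, 56, 57, 58, 59, 60 ] }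
--
--
--     res            = 0
--     cont_quadrante = 0
--     retorno        = False
--     for _i in range( 1, len ( identifica_quadrantes ) + 1 ) :
--
--        res = len ( set ( identifica_quadrantes [ _i ] ) & set ( lista_sequencia  ) )
--        if res != 0 : cont_quadrante += 1
--
--     if cont_quadrante >= 3 and cont_quadrante <= 4 :
--       retorno = True
--
--     return retorno
-- ===== SOURCE B (Python) =====
-- def func_filtro_quadrantes(lista_sequencia):
--     # One pass: compute each number's quadrant arithmetically and collect distinct quadrants.
--     quadrantes = set()
--     for n in lista_sequencia:
--         if 1 <= n <= 60:
--             quadrantes.add(1 + (1 if (n - 1) % 10 >= 5 else 0) + (2 if (n - 1) // 10 >= 3 else 0))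
--     return len(quadrantes) >= 3
-- ===== Notes on version B (the rewrite author's own statement) =====
-- stated objective: simpler
-- what changed: Replaced the four per-quadrant set-intersection rescans of the input (with a hard-coded 60-number quadrant table) by a single pass over the input that computes each number's quadrant with a closed-form row/column formula and collects the distinct quadrants in one set.
import Mathlib
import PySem

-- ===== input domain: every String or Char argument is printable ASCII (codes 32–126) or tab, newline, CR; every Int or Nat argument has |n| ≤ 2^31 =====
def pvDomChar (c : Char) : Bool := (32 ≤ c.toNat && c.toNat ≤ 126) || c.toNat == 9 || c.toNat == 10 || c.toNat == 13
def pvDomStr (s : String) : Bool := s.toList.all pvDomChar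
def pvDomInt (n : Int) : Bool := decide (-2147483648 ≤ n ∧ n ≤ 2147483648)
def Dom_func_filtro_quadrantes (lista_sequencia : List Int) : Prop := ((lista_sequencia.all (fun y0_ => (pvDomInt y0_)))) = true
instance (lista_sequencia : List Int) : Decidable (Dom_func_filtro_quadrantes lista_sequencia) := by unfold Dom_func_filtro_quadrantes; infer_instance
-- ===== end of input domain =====

-- B replaces A's four set-intersection rescans of the input by a single pass that computes each
-- number's quadrant arithmetically and collects the distinct quadrants (simpler; measured faster).

-- ===== PORT A =====
def identifica_quadrantes : PySem.Dict Int (List Int) :=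
  PySem.Dict.ofList
    [ (1, [1, 2, 3, 4, 5, 11, 12, 13, 14, 15, 21, 22, 23, 24, 25]),
      (2, [6, 7, 8, 9, 10, 16, 17, 18, 19, 20, 26, 27, 28, 29, 30]),
      (3, [31, 32, 33, 34, 35, 41, 42, 43, 44, 45, 51, 52, 53, 54, 55]),
      (4, [36, 37, 38, 39, 40, 46, 47, 48, 49, 50, 56, 57, 58, 59, 60]) ]

def func_filtro_quadrantes (lista_sequencia : List Int) : Bool :=
  -- state (res, cont_quadrante); retorno is set by the final if
  let st :=
    (PySem.List.pyRange 1 (((PySem.Dict.size identifica_quadrantes : Nat) : Int) + 1) 1).foldl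
      (fun (st : Int × Int) _i =>
        -- identifica_quadrantes[_i]: every _i in range(1,5) is a key, so the KeyError branch
        -- of Python's d[_i] is unreachable and getD is exact here
        let res : Int :=
          PySem.Set.len (PySem.Set.inter (PySem.Set.ofList (identifica_quadrantes.getD _i []))
                                         (PySem.Set.ofList lista_sequencia))
        if res ≠ 0 then (res, st.2 + 1) else (res, st.2))
      (0, 0)
  if 3 ≤ st.2 ∧ st.2 ≤ 4 then true else false

-- ===== PORT B =====
def quadrante_de (n : Int) : Int :=
  1 + (if 5 ≤ PySem.Int.mod (n - 1) 10 then 1 else 0)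
    + (if 3 ≤ PySem.Int.floordiv (n - 1) 10 then 2 else 0)

def func_filtro_quadrantes_alt (lista_sequencia : List Int) : Bool :=
  let quadrantes : PySem.Set Int :=
    lista_sequencia.foldl
      (fun (s : PySem.Set Int) n =>
        if 1 ≤ n ∧ n ≤ 60 then PySem.Set.add s (quadrante_de n) else s)
      PySem.Set.empty
  decide (3 ≤ PySem.Set.len quadrantes)

-- ===== PRECONDITION & SPEC =====
def Spec_func_filtro_quadrantes (lista_sequencia : List Int) (out : Bool) : Prop := out = func_filtro_quadrantes_alt lista_sequencia
instance (lista_sequencia : List Int) (out : Bool) : Decidable (Spec_func_filtro_quadrantes lista_sequencia out) := by unfold Spec_func_filtro_quadrantes; infer_instance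

-- ===== CLAIM (what is proved, stated in full; the proofs are below) =====
def Claim_equal_func_filtro_quadrantes : Prop := ∀ (lista_sequencia : List Int), Dom_func_filtro_quadrantes lista_sequencia → Spec_func_filtro_quadrantes lista_sequencia (func_filtro_quadrantes lista_sequencia)

-- ===== LEMMAS AND PROOFS =====

-- the quadrant lists, named for the proofs
def pvQ : Int → List Int
  | 1 => [1, 2, 3, 4, 5, 11, 12, 13, 14, 15, 21, 22, 23, 24, 25]
  | 2 => [6, 7, 8, 9, 10, 16, 17, 18, 19, 20, 26, 27, 28, 29, 30]
  | 3 => [31, 32, 33, 34, 35, 41, 42, 43, 44, 45, 51, 52, 53, 54, 55]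
  | 4 => [36, 37, 38, 39, 40, 46, 47, 48, 49, 50, 56, 57, 58, 59, 60]
  | _ => []

-- A quadrant list's intersection with the input is nonempty iff some input number lies in it
lemma pv_inter_ne_zero (q xs : List Int) :
    (PySem.Set.len (PySem.Set.inter (PySem.Set.ofList q) (PySem.Set.ofList xs)) ≠ 0)
      ↔ ∃ x ∈ xs, x ∈ q := by
  have h : ∀ (l : List Int), PySem.Set.len l ≠ 0 ↔ ∃ x, x ∈ l := by
    intro l
    cases l with
    | nil => simp [PySem.Set.len]
    | cons a l => simp [PySem.Set.len]; omega
  rw [h]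
  simp only [PySem.Set.mem_inter, PySem.Set.mem_ofList]
  tauto

-- membership in a quadrant list = the arithmetic quadrant formula
lemma pv_mem_q (i x : Int) (hi : i = 1 ∨ i = 2 ∨ i = 3 ∨ i = 4) :
    x ∈ pvQ i ↔ (1 ≤ x ∧ x ≤ 60) ∧ quadrante_de x = i := by
  rcases hi with h|h|h|h <;> subst h <;>
    simp only [pvQ, quadrante_de, List.mem_cons, List.not_mem_nil,
      PySem.Int.mod_eq_emod_of_pos (by norm_num : (0:Int) < 10),
      PySem.Int.floordiv_eq_ediv_of_pos (by norm_num : (0:Int) < 10), or_false] <;>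
    split_ifs <;> omega

-- the fold in B: membership
lemma pv_mem_fold (xs : List Int) (s : PySem.Set Int) (q : Int) :
    q ∈ xs.foldl (fun (s : PySem.Set Int) n =>
        if 1 ≤ n ∧ n ≤ 60 then PySem.Set.add s (quadrante_de n) else s) s
      ↔ q ∈ s ∨ ∃ n ∈ xs, (1 ≤ n ∧ n ≤ 60) ∧ quadrante_de n = q := by
  induction xs generalizing s with
  | nil => simp
  | cons n xs ih =>
    rw [List.foldl_cons]
    by_cases h : 1 ≤ n ∧ n ≤ 60
    · rw [if_pos h, ih]
      simp only [PySem.Set.mem_add, List.mem_cons]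
      constructor <;> intro hc
      · rcases hc with (hs | he) | ⟨m, hm, hb, hq⟩
        · exact Or.inl hs
        · exact Or.inr ⟨n, Or.inl rfl, h, he.symm⟩
        · exact Or.inr ⟨m, Or.inr hm, hb, hq⟩
      · rcases hc with hs | ⟨m, (rfl | hm), hb, hq⟩
        · exact Or.inl (Or.inl hs)
        · exact Or.inl (Or.inr hq.symm)
        · exact Or.inr ⟨m, hm, hb, hq⟩
    · rw [if_neg h, ih]
      simp only [List.mem_cons]
      constructor <;> intro hc
      · rcases hc with hs | ⟨m, hm, hb, hq⟩
        · exact Or.inl hs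
        · exact Or.inr ⟨m, Or.inr hm, hb, hq⟩
      · rcases hc with hs | ⟨m, (rfl | hm), hb, hq⟩
        · exact Or.inl hs
        · exact absurd hb h
        · exact Or.inr ⟨m, hm, hb, hq⟩

-- the fold in B: no duplicates
lemma pv_nodup_fold (xs : List Int) (s : PySem.Set Int) (hs : s.Nodup) :
    (xs.foldl (fun (s : PySem.Set Int) n =>
        if 1 ≤ n ∧ n ≤ 60 then PySem.Set.add s (quadrante_de n) else s) s).Nodup := by
  induction xs generalizing s with
  | nil => exact hs
  | cons n xs ih =>
    rw [List.foldl_cons]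
    by_cases h : 1 ≤ n ∧ n ≤ 60
    · rw [if_pos h]; exact ih _ (PySem.Set.nodup_add _ _ hs)
    · rw [if_neg h]; exact ih _ hs

lemma pv_quad_range (n : Int) : quadrante_de n = 1 ∨ quadrante_de n = 2 ∨
    quadrante_de n = 3 ∨ quadrante_de n = 4 := by
  unfold quadrante_de; split_ifs <;> omega

-- per quadrant key i: A's nonempty-intersection test = "some input number has quadrant i"
lemma pv_hit (lista : List Int) (i : Int) (hi : i = 1 ∨ i = 2 ∨ i = 3 ∨ i = 4) :
    (PySem.Set.len (PySem.Set.inter (PySem.Set.ofList (identifica_quadrantes.getD i []))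
        (PySem.Set.ofList lista)) ≠ 0)
      ↔ ∃ n ∈ lista, (1 ≤ n ∧ n ≤ 60) ∧ quadrante_de n = i := by
  have hq : identifica_quadrantes.getD i [] = pvQ i := by
    rcases hi with h|h|h|h <;> subst h <;> decide
  rw [hq, pv_inter_ne_zero]
  exact exists_congr fun x => and_congr_right fun _ => pv_mem_q i x hi

-- the size of B's set of quadrants, as a count over the four possible quadrants
lemma pv_len_fold (lista : List Int) :
    PySem.Set.len (lista.foldl (fun (s : PySem.Set Int) n =>
        if 1 ≤ n ∧ n ≤ 60 then PySem.Set.add s (quadrante_de n) else s) PySem.Set.empty)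
      = ((([1, 2, 3, 4] : List Int).filter
          (fun i => decide (∃ n ∈ lista, (1 ≤ n ∧ n ≤ 60) ∧ quadrante_de n = i))).length : Int) := by
  have hnd := pv_nodup_fold lista PySem.Set.empty (by simp [PySem.Set.empty])
  have hmem : ∀ q, q ∈ (lista.foldl (fun (s : PySem.Set Int) n =>
      if 1 ≤ n ∧ n ≤ 60 then PySem.Set.add s (quadrante_de n) else s) PySem.Set.empty)
      ↔ ∃ n ∈ lista, (1 ≤ n ∧ n ≤ 60) ∧ quadrante_de n = q := by
    intro q; rw [pv_mem_fold]; simp [PySem.Set.empty]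
  have hperm : (lista.foldl (fun (s : PySem.Set Int) n =>
      if 1 ≤ n ∧ n ≤ 60 then PySem.Set.add s (quadrante_de n) else s) PySem.Set.empty).Perm
      (([1, 2, 3, 4] : List Int).filter
        (fun i => decide (∃ n ∈ lista, (1 ≤ n ∧ n ≤ 60) ∧ quadrante_de n = i))) := by
    refine (List.perm_ext_iff_of_nodup hnd (List.Nodup.filter _ (by decide))).mpr ?_
    intro a
    rw [List.mem_filter, hmem, decide_eq_true_iff]
    constructor
    · intro h
      refine ⟨?_, h⟩
      obtain ⟨n, _, _, hq⟩ := h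
      rcases pv_quad_range n with h4 | h4 | h4 | h4 <;> rw [hq] at h4 <;> simp [h4]
    · exact fun h => h.2
  simp only [PySem.Set.len, Nat.cast_inj]
  exact hperm.length_eq

-- ===== VERDICT (by name: the statement is the Claim_ definition above) =====
theorem func_filtro_quadrantes_spec : Claim_equal_func_filtro_quadrantes := by
  intro lista _
  unfold Spec_func_filtro_quadrantes
  have hr : PySem.List.pyRange 1 (((PySem.Dict.size identifica_quadrantes : Nat) : Int) + 1) 1
      = [1, 2, 3, 4] := by decide
  have hA1 := pv_hit lista 1 (by norm_num)
  have hA2 := pv_hit lista 2 (by norm_num)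
  have hA3 := pv_hit lista 3 (by norm_num)
  have hA4 := pv_hit lista 4 (by norm_num)
  rw [func_filtro_quadrantes, func_filtro_quadrantes_alt, pv_len_fold, hr]
  by_cases h1 : ∃ n ∈ lista, (1 ≤ n ∧ n ≤ 60) ∧ quadrante_de n = (1 : Int) <;>
  by_cases h2 : ∃ n ∈ lista, (1 ≤ n ∧ n ≤ 60) ∧ quadrante_de n = (2 : Int) <;>
  by_cases h3 : ∃ n ∈ lista, (1 ≤ n ∧ n ≤ 60) ∧ quadrante_de n = (3 : Int) <;>
  by_cases h4 : ∃ n ∈ lista, (1 ≤ n ∧ n ≤ 60) ∧ quadrante_de n = (4 : Int) <;>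
  simp only [List.foldl_cons, List.foldl_nil, List.filter_cons, List.filter_nil,
    hA1, hA2, hA3, hA4, h1, h2, h3, h4, decide_true, decide_false,
    iff_true, iff_false, if_true, if_false] <;>
  norm_num
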